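-- pv_equiv track=rewrite | github.com/yiming1012/MyLeetCode | LeetCode/并查集/685. 冗余连接 II.py | findRedundantDirectedConnection2
-- ===== SOURCE A (Python) =====
-- from typing import List
--
-- def findRedundantDirectedConnection2(edges: List[List[int]]) -> List[int]:
--     n = len(edges) + 1
--     parent = {i: i for i in range(n + 1)}
--
--     def find(x):
--         if x != parent[x]:
--             parent[x] = find(parent[x])
--         return parent[x]
--
--     root = {}
--     ind = []
--     ring = None
--     for u, v in edges:
--         if v in root:
--             ind.append([root[v], v])
--             ind.append([u, v])
--         else:
--             root[v] = u
--             a, b = find(u), find(v)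
--             if a != b:
--                 parent[b] = a
--             else:
--                 ring = [u, v]
--     # 如果没有入度为2的，去掉构成环的边
--     if not ind:
--         return ring
--     # 如果还有环，说明需要删掉前面的一条，因为后面的一条边没加到ind中
--     return ind[0] if ring else ind[1]
-- ===== SOURCE B (Python) =====
-- def findRedundantDirectedConnection2(edges):
--     # quick-find (component labels over a table, merged by relabelling) instead of a parent forest
--     n = len(edges) + 1
--     fp = {}                               # node -> its first recorded parent
--     comp = {i: i for i in range(n + 1)}   # quick-find label table
--     cand1 = cand2 = ring = None
--     for u, v in edges:
--         if v in fp: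
--             if cand1 is None:
--                 cand1, cand2 = [fp[v], v], [u, v]
--         else:
--             fp[v] = u
--             cu, cv = comp[u], comp[v]
--             if cu == cv:
--                 ring = [u, v]
--             else:
--                 for x in comp:
--                     if comp[x] == cv:
--                         comp[x] = cu
--     if cand1 is None:
--         return ring
--     return cand1 if ring else cand2
-- ===== Notes on version B (the rewrite author's own statement) =====
-- stated objective: alternative
-- what changed: Replaces A's path-compressed union-find forest (recursive find over parent pointers, plus an ind list recording every double-parent sighting and indexed at the end) with a quick-find label table: the cycle test is two direct label lookups, a merge relabels the absorbed component in place with a scan, and only the first double-parent node's two candidate edges are tracked.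
import Mathlib
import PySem

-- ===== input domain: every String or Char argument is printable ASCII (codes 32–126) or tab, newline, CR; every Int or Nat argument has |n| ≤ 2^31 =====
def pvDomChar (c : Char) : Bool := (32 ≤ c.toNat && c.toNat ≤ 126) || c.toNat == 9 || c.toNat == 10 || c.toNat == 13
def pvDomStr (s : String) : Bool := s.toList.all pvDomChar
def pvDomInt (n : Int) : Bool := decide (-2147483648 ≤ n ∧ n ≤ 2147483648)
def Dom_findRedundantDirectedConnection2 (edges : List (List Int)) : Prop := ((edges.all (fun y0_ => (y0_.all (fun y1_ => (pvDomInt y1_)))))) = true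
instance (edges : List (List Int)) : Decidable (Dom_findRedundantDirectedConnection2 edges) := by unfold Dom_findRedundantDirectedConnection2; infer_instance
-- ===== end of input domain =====

-- B replaces A's path-compressed union-find forest (recursive find over a parent dict,
-- plus an ind list of every double-parent sighting) by a quick-find label table:
-- cycle test is two label lookups, a merge relabels the absorbed component in place,
-- and only the first double-parent's two candidate edges are kept.
-- Equivalence of the RETURN value is proved; neither version mutates its input.

-- ===== PORT A =====
-- Python's  `{i: i for i in range(n + 1)}`  (A's parent dict; Source B builds its label table
-- with the same comprehension, so the B port reuses this helper)
def pyInitParent (n : Int) : PySem.Dict Int Int :=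
  (PySem.List.pyRange 0 (n + 1) 1).foldl (fun d i => d.insert i i) PySem.Dict.empty

-- A's recursive `find` with path compression; fuel-bounded port of Python recursion
-- (fuel len+3 exceeds any parent-chain length on inputs where Python returns).
def pyFindA (fuel : Nat) (parent : PySem.Dict Int Int) (x : Int) : PySem.Dict Int Int × Int :=
  match fuel with
  | 0 => (parent, x)
  | Nat.succ f =>
    let px := parent.getD x x
    if x ≠ px then
      let r := pyFindA f parent px
      (r.1.insert x r.2, r.2)
    else (parent, x)

-- one iteration of A's `for u, v in edges` loop; state = (parent, root, ind, ring)
def stepA (fuel : Nat)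
    (s : PySem.Dict Int Int × PySem.Dict Int Int × List (List Int) × Option (List Int))
    (e : List Int) :
    PySem.Dict Int Int × PySem.Dict Int Int × List (List Int) × Option (List Int) :=
  match e with
  | [u, v] =>
    let (parent, root, ind, ring) := s
    match root.get? v with
    | some rv => (parent, root, ind ++ [[rv, v], [u, v]], ring)
    | none =>
      let root' := root.insert v u
      let fa := pyFindA fuel parent u
      let fb := pyFindA fuel fa.1 v
      if fa.2 ≠ fb.2 then (fb.1.insert fb.2 fa.2, root', ind, ring)
      else (fb.1, root', ind, some [u, v])
  | _ => s  -- unreachable under Pre_ (Python raises on a row that is not a pair)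

def findRedundantDirectedConnection2 (edges : List (List Int)) : Option (List Int) :=
  let n : Int := (edges.length : Int) + 1
  let fuel := edges.length + 3
  let s := edges.foldl (stepA fuel) (pyInitParent n, PySem.Dict.empty, [], none)
  let ind := s.2.2.1
  let ring := s.2.2.2
  if ind.isEmpty then ring
  else if ring.isSome then ind[0]? else ind[1]?

-- ===== PORT B =====
-- B's relabel loop: `for x in comp: if comp[x] == cv: comp[x] = cu`
def relabelB (comp : PySem.Dict Int Int) (cv cu : Int) : PySem.Dict Int Int :=
  comp.keys.foldl
    (fun d x =>
      match d.get? x with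
      | some c => if c = cv then d.insert x cu else d
      | none => d) comp

-- one iteration of B's loop; state = (fp, comp, cand1, cand2, ring)
def stepB
    (s : PySem.Dict Int Int × PySem.Dict Int Int × Option (List Int) × Option (List Int) × Option (List Int))
    (e : List Int) :
    PySem.Dict Int Int × PySem.Dict Int Int × Option (List Int) × Option (List Int) × Option (List Int) :=
  match e with
  | [u, v] =>
    let (fp, comp, c1, c2, ring) := s
    match fp.get? v with
    | some w =>
      if c1 = none then (fp, comp, some [w, v], some [u, v], ring) else (fp, comp, c1, c2, ring)
    | none =>
      let fp' := fp.insert v u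
      let cu := comp.getD u u
      let cv := comp.getD v v
      if cu = cv then (fp', comp, c1, c2, some [u, v])
      else (fp', relabelB comp cv cu, c1, c2, ring)
  | _ => s

def findRedundantDirectedConnection2_alt (edges : List (List Int)) : Option (List Int) :=
  let n : Int := (edges.length : Int) + 1
  let s := edges.foldl stepB (PySem.Dict.empty, pyInitParent n, none, none, none)
  let c1 := s.2.2.1
  let c2 := s.2.2.2.1
  let ring := s.2.2.2.2
  match c1 with
  | none => ring
  | some c => if ring.isSome then some c else c2

-- ===== PRECONDITION & SPEC =====
-- Pre_ excludes exactly the inputs where both Pythons raise: a row that is not a pair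
-- (ValueError on unpacking) or an endpoint outside 0..len(edges)+1 (KeyError in A's
-- find / B's label table).
def Pre_findRedundantDirectedConnection2 (edges : List (List Int)) : Prop :=
  ∀ e ∈ edges, e.length = 2 ∧ ∀ x ∈ e, 0 ≤ x ∧ x ≤ (edges.length : Int) + 1
instance (edges : List (List Int)) : Decidable (Pre_findRedundantDirectedConnection2 edges) := by
  unfold Pre_findRedundantDirectedConnection2; infer_instance

def pvWitness_findRedundantDirectedConnection2 : List (List Int) := [[1, 2], [2, 1]]

def Spec_findRedundantDirectedConnection2 (edges : List (List Int)) (out : Option (List Int)) : Prop := out = findRedundantDirectedConnection2_alt edges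
instance (edges : List (List Int)) (out : Option (List Int)) : Decidable (Spec_findRedundantDirectedConnection2 edges out) := by unfold Spec_findRedundantDirectedConnection2; infer_instance

-- ===== CLAIM (what is proved, stated in full; the proofs are below) =====
def Claim_equal_findRedundantDirectedConnection2 : Prop := ∀ (edges : List (List Int)), Dom_findRedundantDirectedConnection2 edges → Pre_findRedundantDirectedConnection2 edges → Spec_findRedundantDirectedConnection2 edges (findRedundantDirectedConnection2 edges)

-- ===== LEMMAS AND PROOFS =====

-- ghost invariant for A's parent dict: d is a depth measure, ρ the root map
def UFInv (p : PySem.Dict Int Int) (d : Int → Nat) (ρ : Int → Int) : Prop :=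
  (∀ x, p.getD x x = x → d x = 0 ∧ ρ x = x) ∧
  (∀ x, p.getD x x ≠ x → d (p.getD x x) < d x ∧ ρ (p.getD x x) = ρ x)

lemma rho_root {p : PySem.Dict Int Int} {d : Int → Nat} {ρ : Int → Int}
    (h : UFInv p d ρ) : ∀ n x, d x ≤ n → p.getD (ρ x) (ρ x) = ρ x ∧ d (ρ x) = 0 ∧ ρ (ρ x) = ρ x := by
  intro n
  induction n with
  | zero =>
    intro x hx
    by_cases hr : p.getD x x = x
    · obtain ⟨hd0, hρ⟩ := h.1 x hr
      rw [hρ]; exact ⟨hr, hd0, hρ⟩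
    · obtain ⟨hlt, _⟩ := h.2 x hr; omega
  | succ n ih =>
    intro x hx
    by_cases hr : p.getD x x = x
    · obtain ⟨hd0, hρ⟩ := h.1 x hr
      rw [hρ]; exact ⟨hr, hd0, hρ⟩
    · obtain ⟨hlt, hρ⟩ := h.2 x hr
      rw [← hρ]
      exact ih _ (by omega)

lemma find_spec {d : Int → Nat} {ρ : Int → Int} :
    ∀ (fuel : Nat) (p : PySem.Dict Int Int) (x : Int), UFInv p d ρ → d x < fuel →
      (pyFindA fuel p x).2 = ρ x ∧ UFInv (pyFindA fuel p x).1 d ρ ∧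
      (∀ y, p.getD y y = y → (pyFindA fuel p x).1.getD y y = y) := by
  intro fuel
  induction fuel with
  | zero => intro p x _ hx; omega
  | succ f ih =>
    intro p x h hx
    by_cases hr : x ≠ p.getD x x
    · have hne := Ne.symm hr
      obtain ⟨hlt, hρ⟩ := h.2 x hne
      obtain ⟨ih2, ihInv, ihRoot⟩ := ih p (p.getD x x) h (by omega)
      have hroot := rho_root h (d x) x (le_refl _)
      have hρxne : ρ x ≠ x := by
        intro he
        rw [he] at hroot
        exact hne hroot.1
      simp only [pyFindA, if_pos hr]
      refine ⟨by rw [ih2, hρ], ?_, ?_⟩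
      · constructor
        · intro y hy
          rw [PySem.Dict.getD_insert] at hy
          split_ifs at hy with hxy
          · rw [ih2, hρ] at hy; subst hxy; exact absurd hy hρxne
          · exact ihInv.1 y hy
        · intro y hy
          rw [PySem.Dict.getD_insert] at hy ⊢
          split_ifs at hy ⊢ with hxy
          · subst hxy
            rw [ih2, hρ]
            refine ⟨?_, hroot.2.2⟩
            rw [hroot.2.1]; omega
          · exact ihInv.2 y hy
      · intro y hy
        rw [PySem.Dict.getD_insert]
        split_ifs with hxy
        · subst hxy; exact absurd hy hne
        · exact ihRoot y hy
    · simp only [pyFindA, if_neg hr]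
      have hr' : p.getD x x = x := (not_not.mp hr).symm
      exact ⟨(h.1 x hr').2.symm, h, fun y hy => hy⟩

lemma pyFindA_root {p : PySem.Dict Int Int} {x : Int} (h : p.getD x x = x) (fuel : Nat) :
    pyFindA fuel p x = (p, x) := by
  cases fuel with
  | zero => rfl
  | succ f => simp [pyFindA, h]

-- linking root b (with a ≠ b, a a root) updates ρ and d as quick-find does
lemma union_spec {p : PySem.Dict Int Int} {d : Int → Nat} {ρ : Int → Int} {a b : Int}
    (h : UFInv p d ρ) (hb : p.getD b b = b) (ha : p.getD a a = a) (hne : a ≠ b) :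
    UFInv (p.insert b a) (fun x => if ρ x = b then d x + 1 else d x)
      (fun x => if ρ x = b then a else ρ x) := by
  obtain ⟨hdb, hρb⟩ := h.1 b hb
  obtain ⟨hda, hρa⟩ := h.1 a ha
  constructor
  · intro y hy
    rw [PySem.Dict.getD_insert] at hy
    split_ifs at hy with hyb
    · subst hyb; exact absurd hy hne
    · obtain ⟨h0, hρy⟩ := h.1 y hy
      simp [h0, hρy, hyb]
  · intro y hy
    rw [PySem.Dict.getD_insert] at hy ⊢
    split_ifs at hy ⊢ with hyb
    · subst hyb
      have g1 : (if ρ a = y then d a + 1 else d a) < (if ρ y = y then d y + 1 else d y) := by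
        rw [hρa, hρb, if_neg hne, if_pos rfl]; omega
      have g2 : (if ρ a = y then a else ρ a) = (if ρ y = y then a else ρ y) := by
        rw [hρa, hρb, if_neg hne, if_pos rfl]
      exact ⟨g1, g2⟩
    · obtain ⟨hlt, hρy⟩ := h.2 y hy
      have g1 : (if ρ (p.getD y y) = b then d (p.getD y y) + 1 else d (p.getD y y)) <
          (if ρ y = b then d y + 1 else d y) := by
        rw [hρy]; split_ifs <;> omega
      have g2 : (if ρ (p.getD y y) = b then a else ρ (p.getD y y)) =
          (if ρ y = b then a else ρ y) := by rw [hρy]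
      exact ⟨g1, g2⟩

-- the initial dict of `{i: i for i in range(n + 1)}`: key set 0..n, every key its own value
lemma initParent_get? (m : Int) :
    ∀ x, (pyInitParent m).get? x = if 0 ≤ x ∧ x ≤ m then some x else none := by
  have main : ∀ (l : List Int) (dd : PySem.Dict Int Int) (x : Int),
      (l.foldl (fun d i => d.insert i i) dd).get? x =
        if x ∈ l then some x else dd.get? x := by
    intro l
    induction l with
    | nil => intro dd x; simp
    | cons i l ih =>
      intro dd x
      simp only [List.foldl_cons]
      rw [ih]
      by_cases hl : x ∈ l
      · rw [if_pos hl, if_pos (List.mem_cons_of_mem i hl)]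
      · rw [if_neg hl, PySem.Dict.get?_insert]
        by_cases hxi : x = i
        · subst hxi; simp
        · rw [if_neg hxi, if_neg (by simp [hxi, hl])]
  intro x
  unfold pyInitParent
  rw [main]
  by_cases hx : x ∈ PySem.List.pyRange 0 (m + 1) 1
  · have := PySem.List.mem_pyRange_one.mp hx
    rw [if_pos hx, if_pos (by omega)]
  · have : ¬ (0 ≤ x ∧ x < m + 1) := fun hc => hx (PySem.List.mem_pyRange_one.mpr hc)
    rw [if_neg hx, if_neg (by omega)]
    simp [PySem.Dict.get?_empty]

lemma initParent_getD (m : Int) : ∀ x, (pyInitParent m).getD x x = x := by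
  intro x
  rw [PySem.Dict.getD_eq_get?_getD, initParent_get?]
  split_ifs <;> rfl

-- relabelB rewrites every stored value cv to cu (cu ≠ cv), leaving the key set unchanged
lemma relabelB_get? {comp : PySem.Dict Int Int} {cv cu : Int} (hcu : cu ≠ cv) (x : Int) :
    (relabelB comp cv cu).get? x = (comp.get? x).map (fun c => if c = cv then cu else c) := by
  have step : ∀ (dd : PySem.Dict Int Int) (y x : Int),
      (match dd.get? y with
       | some c => if c = cv then dd.insert y cu else dd
       | none => dd).get? x =
      if x = y then (dd.get? y).map (fun c => if c = cv then cu else c) else dd.get? x := by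
    intro dd y x
    cases hy : dd.get? y with
    | none =>
      dsimp only
      by_cases hxy : x = y
      · subst hxy; rw [if_pos rfl, hy]; rfl
      · rw [if_neg hxy]
    | some c =>
      dsimp only
      by_cases hcvc : c = cv
      · rw [if_pos hcvc, PySem.Dict.get?_insert]
        by_cases hxy : x = y
        · subst hxy; rw [if_pos rfl, if_pos rfl]
          simp [hcvc]
        · rw [if_neg hxy, if_neg hxy]
      · rw [if_neg hcvc]
        by_cases hxy : x = y
        · subst hxy; rw [if_pos rfl, hy]; simp [hcvc]
        · rw [if_neg hxy]
  have main : ∀ (l : List Int) (dd : PySem.Dict Int Int) (x : Int),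
      (l.foldl (fun d y =>
        match d.get? y with
        | some c => if c = cv then d.insert y cu else d
        | none => d) dd).get? x =
      if x ∈ l then (dd.get? x).map (fun c => if c = cv then cu else c) else dd.get? x := by
    intro l
    induction l with
    | nil => intro dd x; simp
    | cons y l ih =>
      intro dd x
      simp only [List.foldl_cons]
      rw [ih]
      by_cases hmem : x ∈ l
      · rw [if_pos hmem, if_pos (List.mem_cons_of_mem y hmem), step]
        split_ifs with hxy
        · subst hxy
          cases hc : dd.get? x with
          | none => rfl
          | some c =>
            simp only [Option.map_some]
            split_ifs with hcvc
            · simp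
            · simp
        · rfl
      · rw [if_neg hmem, step]
        by_cases hxy : x = y
        · subst hxy; simp
        · rw [if_neg hxy, if_neg (by simp [hxy, hmem])]
  unfold relabelB
  rw [main]
  by_cases hk : x ∈ comp.keys
  · rw [if_pos hk]
  · rw [if_neg hk, (PySem.Dict.get?_eq_none_iff_not_mem_keys comp x).mpr hk]
    rfl

-- relation between A's ind list and B's two candidates
def CandRel (ind : List (List Int)) (c1 c2 : Option (List Int)) : Prop :=
  (ind = [] ∧ c1 = none ∧ c2 = none) ∨
  ∃ x y r, ind = x :: y :: r ∧ c1 = some x ∧ c2 = some y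

-- main simulation: A's fused union-find loop vs B's quick-find loop; N bounds the node
-- labels (0..N are exactly the label-table keys, = A's parent keys)
lemma loop_main (fuel : Nat) (N : Int) :
    ∀ (es : List (List Int)) (parent root comp : PySem.Dict Int Int)
      (ind : List (List Int)) (ring c1 c2 : Option (List Int))
      (d : Int → Nat) (ρ : Int → Int) (k : Nat),
      UFInv parent d ρ →
      (∀ x, d x ≤ k) → k + es.length < fuel →
      (∀ e ∈ es, ∀ x ∈ e, 0 ≤ x ∧ x ≤ N) →
      (∀ x, comp.get? x = if 0 ≤ x ∧ x ≤ N then some (ρ x) else none) →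
      (∀ x, ¬ (0 ≤ x ∧ x ≤ N) → ρ x = x) →
      (∀ x, root.get? x = none → parent.getD x x = x) →
      CandRel ind c1 c2 →
      CandRel (es.foldl (stepA fuel) (parent, root, ind, ring)).2.2.1
          (es.foldl stepB (root, comp, c1, c2, ring)).2.2.1
          (es.foldl stepB (root, comp, c1, c2, ring)).2.2.2.1 ∧
        (es.foldl (stepA fuel) (parent, root, ind, ring)).2.2.2 =
          (es.foldl stepB (root, comp, c1, c2, ring)).2.2.2.2 := by
  intro es
  induction es with
  | nil => intro parent root comp ind ring c1 c2 d ρ k _ _ _ _ _ _ _ hcand; exact ⟨hcand, rfl⟩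
  | cons e es ih =>
    intro parent root comp ind ring c1 c2 d ρ k hInv hdk hfuel hrows hlink hρout hfresh hcand
    have hfuel' : k + es.length < fuel := by simp at hfuel ⊢; omega
    have hrows' : ∀ e ∈ es, ∀ x ∈ e, 0 ≤ x ∧ x ≤ N :=
      fun e he => hrows e (List.mem_cons_of_mem _ he)
    match e with
    | [] => exact ih parent root comp ind ring c1 c2 d ρ k hInv hdk hfuel' hrows' hlink hρout hfresh hcand
    | [u] => exact ih parent root comp ind ring c1 c2 d ρ k hInv hdk hfuel' hrows' hlink hρout hfresh hcand
    | u :: v :: w :: rest => exact ih parent root comp ind ring c1 c2 d ρ k hInv hdk hfuel' hrows' hlink hρout hfresh hcand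
    | [u, v] =>
      have hfuel2 : k + 1 + es.length < fuel := by simp at hfuel ⊢; omega
      have hu : 0 ≤ u ∧ u ≤ N := (hrows _ List.mem_cons_self) u (by simp)
      have hvN : 0 ≤ v ∧ v ≤ N := (hrows _ List.mem_cons_self) v (by simp)
      simp only [List.foldl_cons]
      cases hv : root.get? v with
      | some w =>
        have hA : stepA fuel (parent, root, ind, ring) [u, v] =
            (parent, root, ind ++ [[w, v], [u, v]], ring) := by simp [stepA, hv]
        rcases hcand with ⟨hind, hc1, hc2⟩ | ⟨x, y, r, hind, hc1, hc2⟩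
        · have hB : stepB (root, comp, c1, c2, ring) [u, v] =
              (root, comp, some [w, v], some [u, v], ring) := by simp [stepB, hv, hc1]
          rw [hA, hB]
          exact ih parent root comp _ ring _ _ d ρ k hInv hdk hfuel' hrows' hlink hρout hfresh
            (Or.inr ⟨[w, v], [u, v], [], by simp [hind], rfl, rfl⟩)
        · have hB : stepB (root, comp, c1, c2, ring) [u, v] =
              (root, comp, c1, c2, ring) := by simp [stepB, hv, hc1]
          rw [hA, hB]
          exact ih parent root comp _ ring _ _ d ρ k hInv hdk hfuel' hrows' hlink hρout hfresh
            (Or.inr ⟨x, y, r ++ [[w, v], [u, v]], by simp [hind], hc1, hc2⟩)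
      | none =>
        have hpv : parent.getD v v = v := hfresh v hv
        obtain ⟨hdv, hρv⟩ := hInv.1 v hpv
        obtain ⟨hfu2, hfuInv, hfuRoot⟩ :=
          find_spec fuel parent u hInv (by have := hdk u; omega)
        have hfb : pyFindA fuel (pyFindA fuel parent u).1 v = ((pyFindA fuel parent u).1, v) :=
          pyFindA_root (hfuRoot v hpv) fuel
        have hcu : comp.getD u u = ρ u := by
          rw [PySem.Dict.getD_eq_get?_getD, hlink u, if_pos hu]; rfl
        have hcvv : comp.getD v v = v := by
          rw [PySem.Dict.getD_eq_get?_getD, hlink v, if_pos hvN, hρv]; rfl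
        by_cases hcyc : ρ u = v
        · -- cycle branch on both sides
          have hA : stepA fuel (parent, root, ind, ring) [u, v] =
              ((pyFindA fuel parent u).1, root.insert v u, ind, some [u, v]) := by
            simp only [stepA, hv, hfb, hfu2]
            rw [if_neg (by simp [hcyc])]
          have hB : stepB (root, comp, c1, c2, ring) [u, v] =
              (root.insert v u, comp, c1, c2, some [u, v]) := by
            simp only [stepB, hv]
            rw [hcu, hcvv, if_pos hcyc]
          rw [hA, hB]
          refine ih _ _ comp ind (some [u, v]) c1 c2 d ρ k hfuInv hdk hfuel' hrows' hlink hρout ?_ hcand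
          intro x hx
          rw [PySem.Dict.get?_insert] at hx
          split_ifs at hx with hxv
          exact hfuRoot x (hfresh x hx)
        · -- union branch on both sides
          have hA : stepA fuel (parent, root, ind, ring) [u, v] =
              ((pyFindA fuel parent u).1.insert v (ρ u), root.insert v u, ind, ring) := by
            simp only [stepA, hv, hfb, hfu2]
            rw [if_pos (by simp [hcyc])]
          have hB : stepB (root, comp, c1, c2, ring) [u, v] =
              (root.insert v u, relabelB comp v (ρ u), c1, c2, ring) := by
            simp only [stepB, hv]
            rw [hcu, hcvv, if_neg hcyc]
          rw [hA, hB]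
          have hroot_u := rho_root hfuInv (d u) u (le_refl _)
          refine ih _ _ _ ind ring c1 c2
            (fun x => if ρ x = v then d x + 1 else d x)
            (fun x => if ρ x = v then ρ u else ρ x) (k + 1)
            (union_spec hfuInv (hfuRoot v hpv) hroot_u.1 hcyc)
            (fun x => by
              have := hdk x
              show (if ρ x = v then d x + 1 else d x) ≤ k + 1
              split_ifs <;> omega)
            hfuel2 hrows' ?_ ?_ ?_ hcand
          · intro x
            rw [relabelB_get? hcyc, hlink x]
            by_cases hxr : 0 ≤ x ∧ x ≤ N
            · rw [if_pos hxr, if_pos hxr]; rfl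
            · rw [if_neg hxr, if_neg hxr]; rfl
          · intro x hxr
            have hx : ρ x = x := hρout x hxr
            have hxv : ρ x ≠ v := by rw [hx]; intro he; exact hxr (he ▸ hvN)
            show (if ρ x = v then ρ u else ρ x) = x
            rw [if_neg hxv, hx]
          · intro x hx
            rw [PySem.Dict.get?_insert] at hx
            split_ifs at hx with hxv
            rw [PySem.Dict.getD_insert, if_neg hxv]
            exact hfuRoot x (hfresh x hx)

-- ===== VERDICT (by name: the statement is the Claim_ definition above) =====
theorem findRedundantDirectedConnection2_spec : Claim_equal_findRedundantDirectedConnection2 := by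
  intro edges _ hpre
  unfold Spec_findRedundantDirectedConnection2
  unfold findRedundantDirectedConnection2 findRedundantDirectedConnection2_alt
  simp only []
  obtain ⟨hcand, hring⟩ :=
    loop_main (edges.length + 3) ((edges.length : Int) + 1) edges
      (pyInitParent ((edges.length : Int) + 1))
      PySem.Dict.empty (pyInitParent ((edges.length : Int) + 1)) [] none none none
      (fun _ => 0) id 0
      ⟨fun x _ => ⟨rfl, rfl⟩, fun x hx => absurd (initParent_getD _ x) hx⟩
      (fun _ => le_refl 0) (by omega)
      (fun e he x hxe => ((hpre e he).2 x hxe))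
      (fun x => initParent_get? _ x)
      (fun _ _ => rfl)
      (fun x _ => initParent_getD _ x)
      (Or.inl ⟨rfl, rfl, rfl⟩)
  rcases hcand with ⟨hind, hc1, hc2⟩ | ⟨x, y, r, hind, hc1, hc2⟩
  · rw [hind, hc1, hring]
    simp
  · rw [hind, hc1, hc2, hring]
    simp
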